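-- pv_equiv track=rewrite | github.com/Allen-cubber/mahjong | utils.py | parse_tiles
-- ===== SOURCE A (Python) =====
-- from typing import List
--
-- def parse_tiles(hand_str: str) -> List[int]:
--     """
--     将天凤格式的字符串解析为牌的 ID 列表。
--     支持的格式例如: '123m456p789s1122z'
--     m: 万(0-8), p: 筒(9-17), s: 索(18-26), z: 字牌(27-33, 1-7分别对应东南西北白发中)
--
--     返回:
--         List[int]: 包含牌 ID 的列表，例如 [0, 1, 2, ...]
--     """
--     result = []
--     current_numbers = []
--     offsets = {'m': 0, 'p': 9, 's': 18, 'z': 27}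
--
--     for char in hand_str:
--         if char.isdigit():
--             current_numbers.append(int(char))
--         elif char in offsets:
--             offset = offsets[char]
--             for num in current_numbers:
--                 # 牌面数字 1-9，对应的内部索引是 0-8，所以要减 1
--                 result.append(num - 1 + offset)
--             current_numbers = []
--
--     return result
-- ===== SOURCE B (Python) =====
-- def parse_tiles(hand_str):
--     """Reverse scan: each digit is resolved against the base of the nearest
--     suit letter to its right; trailing digits (no suit yet) are dropped."""
--     bases = {'m': 0, 'p': 9, 's': 18, 'z': 27}
--     offset = None
--     out = []
--     for ch in reversed(hand_str):
--         if ch in bases: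
--             offset = bases[ch]
--         elif ch.isdigit() and offset is not None:
--             out.append(int(ch) - 1 + offset)
--     out.reverse()
--     return out
-- ===== Notes on version B (the rewrite author's own statement) =====
-- stated objective: alternative
-- what changed: Replaces the left-to-right scan that buffers a digit list and flushes it with an inner loop at each suit letter by a single right-to-left scan keeping one scalar base offset that resolves every digit immediately (no buffer, no inner loop).
import Mathlib
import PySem

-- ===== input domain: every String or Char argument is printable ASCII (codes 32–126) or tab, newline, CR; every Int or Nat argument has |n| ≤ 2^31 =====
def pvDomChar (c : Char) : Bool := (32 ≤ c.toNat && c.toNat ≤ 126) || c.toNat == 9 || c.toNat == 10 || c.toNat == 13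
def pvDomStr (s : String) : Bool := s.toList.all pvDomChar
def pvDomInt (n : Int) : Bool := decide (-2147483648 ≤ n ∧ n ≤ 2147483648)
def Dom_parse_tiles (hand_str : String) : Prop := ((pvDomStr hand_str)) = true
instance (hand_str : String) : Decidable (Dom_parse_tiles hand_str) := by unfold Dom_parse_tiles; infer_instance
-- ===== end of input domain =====

-- B replaces A's buffer-and-flush left scan by a right-to-left scan with one scalar base; alternative decomposition, same cost.

-- ===== PORT A =====
-- offsets = {'m': 0, 'p': 9, 's': 18, 'z': 27}
def pvOffsetsA : PySem.Dict Char Int :=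
  ((((PySem.Dict.empty).insert 'm' 0).insert 'p' 9).insert 's' 18).insert 'z' 27

-- loop body: digit → append int(char) to current_numbers; suit letter → flush current_numbers into result.
-- int(char) on a single digit char is exactly (c.toNat : Int) - 48.
def pvAStep (st : List Int × List Int) (c : Char) : List Int × List Int :=
  if PySem.Chars.isdigit c then
    (st.1, st.2 ++ [((c.toNat : Int) - 48)])
  else
    match pvOffsetsA.get? c with
    | some off => (st.2.foldl (fun r n => r ++ [n - 1 + off]) st.1, [])
    | none => st

def parse_tiles (hand_str : String) : List Int :=
  (hand_str.toList.foldl pvAStep ([], [])).1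

-- ===== PORT B =====
-- bases as an if-chain
def pvBase? (c : Char) : Option Int :=
  if c = 'm' then some 0 else if c = 'p' then some 9
  else if c = 's' then some 18 else if c = 'z' then some 27 else none

-- loop body over the reversed string: state = (current offset, out built backwards)
def pvBStep (st : Option Int × List Int) (c : Char) : Option Int × List Int :=
  match pvBase? c with
  | some b => (some b, st.2)
  | none =>
    if PySem.Chars.isdigit c then
      match st.1 with
      | some o => (st.1, st.2 ++ [((c.toNat : Int) - 48) - 1 + o])
      | none => st
    else st

def parse_tiles_alt (hand_str : String) : List Int :=
  ((hand_str.toList.reverse.foldl pvBStep (none, [])).2).reverse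

-- ===== PRECONDITION & SPEC =====
def Spec_parse_tiles (hand_str : String) (out : List Int) : Prop := out = parse_tiles_alt hand_str
instance (hand_str : String) (out : List Int) : Decidable (Spec_parse_tiles hand_str out) := by unfold Spec_parse_tiles; infer_instance

-- ===== CLAIM (what is proved, stated in full; the proofs are below) =====
def Claim_equal_parse_tiles : Prop := ∀ (hand_str : String), Dom_parse_tiles hand_str → Spec_parse_tiles hand_str (parse_tiles hand_str)

-- ===== LEMMAS AND PROOFS =====

lemma pvOffsets_eq_base (c : Char) : pvOffsetsA.get? c = pvBase? c := by
  unfold pvBase?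
  split_ifs with h1 h2 h3 h4 <;> first
    | (subst_vars; decide)
    | (simp only [pvOffsetsA]
       rw [PySem.Dict.get?_insert_of_ne, PySem.Dict.get?_insert_of_ne,
           PySem.Dict.get?_insert_of_ne, PySem.Dict.get?_insert_of_ne] <;>
         simp_all [PySem.Dict.get?, PySem.Dict.empty])

lemma pvBase_isdigit_false {c : Char} {b : Int} (h : pvBase? c = some b) :
    PySem.Chars.isdigit c = false := by
  unfold pvBase? at h
  split_ifs at h <;> (subst_vars ; decide)

lemma pvMain (cs : List Char) : ∀ (res cur : List Int),
    (cs.foldl pvAStep (res, cur)).1 =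
      res ++ (match cs.reverse.foldl pvBStep (none, []) with
              | (some o, out) => cur.map (fun n => n - 1 + o) ++ out.reverse
              | (none, out) => out.reverse) := by
  induction cs with
  | nil => intro res cur; simp
  | cons c cs ih =>
    intro res cur
    have hrev : (c :: cs).reverse.foldl pvBStep (none, []) =
        pvBStep (cs.reverse.foldl pvBStep (none, [])) c := by
      simp [List.foldl_append]
    rw [List.foldl_cons, hrev]
    rcases hst : cs.reverse.foldl pvBStep (none, []) with ⟨off, out⟩
    rcases hb : pvBase? c with _ | b
    · by_cases hd : PySem.Chars.isdigit c = true
      · -- digit: buffer it (A) / resolve it now if an offset is known (B)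
        rw [show pvAStep (res, cur) c = (res, cur ++ [((c.toNat : Int) - 48)]) by
              simp [pvAStep, hd]]
        rw [ih res (cur ++ [((c.toNat : Int) - 48)]), hst]
        cases off with
        | none => simp [pvBStep, hb, hd]
        | some o => simp [pvBStep, hb, hd]
      · -- irrelevant char: both states unchanged
        rw [show pvAStep (res, cur) c = (res, cur) by
              simp [pvAStep, hd, pvOffsets_eq_base, hb]]
        rw [ih res cur, hst]
        cases off <;> simp [pvBStep, hb, hd]
    · -- suit letter: A flushes the buffer, B records the base
      have hd := pvBase_isdigit_false hb
      rw [show pvAStep (res, cur) c =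
            (cur.foldl (fun r n => r ++ [n - 1 + b]) res, []) by
              simp [pvAStep, hd, pvOffsets_eq_base, hb]]
      rw [ih _ [], hst]
      rw [PySem.List.foldl_append_singleton_eq_map]
      cases off <;> simp [pvBStep, hb]

-- ===== VERDICT (by name: the statement is the Claim_ definition above) =====
theorem parse_tiles_spec : Claim_equal_parse_tiles := by
  intro s _
  unfold Spec_parse_tiles parse_tiles parse_tiles_alt
  rw [pvMain s.toList [] []]
  rcases h : s.toList.reverse.foldl pvBStep (none, []) with ⟨off, out⟩
  cases off <;> simp
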